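-- pv_equiv track=rewrite | github.com/aazambrano2/CS3-Labs | Binary Search Tree List Implementation/Zambrano_Aaron_Lab4.py | balanced_list
-- ===== SOURCE A (Python) =====
-- def balanced_list(A):
--     b = []
--     A.sort()
--     if A == []:
--         return []
--     mid = len(A) // 2
--     b.insert(0,A[mid])
--     return b + balanced_list(A[:mid]) + balanced_list(A[mid+1:])
-- ===== SOURCE B (Python) =====
-- def balanced_list(A):
--     A.sort()  # same in-place sort side effect as the original
--     def go(lo, hi):
--         if lo >= hi:
--             return []
--         mid = (lo + hi) // 2
--         return [A[mid]] + go(lo, mid) + go(mid + 1, hi)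
--     return go(0, len(A))
-- ===== Notes on version B (the rewrite author's own statement) =====
-- stated objective: faster
-- what changed: Sort once and recurse over (lo,hi) index ranges of the sorted list instead of re-sorting and copying slices at every recursive call.
import Mathlib
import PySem

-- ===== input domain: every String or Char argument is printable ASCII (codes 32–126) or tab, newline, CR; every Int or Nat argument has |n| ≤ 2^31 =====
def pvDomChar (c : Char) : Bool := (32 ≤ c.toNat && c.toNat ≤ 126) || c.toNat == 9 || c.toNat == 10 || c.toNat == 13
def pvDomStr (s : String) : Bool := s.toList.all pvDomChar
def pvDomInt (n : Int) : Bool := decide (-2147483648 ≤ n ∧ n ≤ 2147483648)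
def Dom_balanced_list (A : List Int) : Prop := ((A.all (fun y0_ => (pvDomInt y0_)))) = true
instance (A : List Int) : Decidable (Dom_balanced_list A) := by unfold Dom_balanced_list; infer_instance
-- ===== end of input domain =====

-- B sorts once and recurses over index ranges instead of re-sorting and copying slices;
-- both A and B sort the argument list in place (the theorems are about the return value).


-- ===== PORT A =====
-- termination facts for the two recursive calls of balanced_list (cited by name in decreasing_by)
theorem balanced_list_dec_left (A : List Int)
    (h : ¬ PySem.List.sorted A (fun x => x) false = []) :
    (PySem.List.slice (PySem.List.sorted A (fun x => x) false) none
      (some (((PySem.List.sorted A (fun x => x) false).length / 2 : Nat) : Int))).length < A.length := by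
  have hl : (PySem.List.sorted A (fun x => x) false).length = A.length :=
    PySem.List.length_sorted A (fun x => x) false
  have hne : A.length ≠ 0 := by
    intro hc
    exact h (by rw [List.eq_nil_of_length_eq_zero hc]; rfl)
  rw [PySem.List.slice_to_natCast, List.length_take, hl]
  omega

theorem balanced_list_dec_right (A : List Int)
    (h : ¬ PySem.List.sorted A (fun x => x) false = []) :
    (PySem.List.slice (PySem.List.sorted A (fun x => x) false)
      (some ((((PySem.List.sorted A (fun x => x) false).length / 2 : Nat) : Int) + 1)) none).length < A.length := by
  have hl : (PySem.List.sorted A (fun x => x) false).length = A.length :=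
    PySem.List.length_sorted A (fun x => x) false
  have hne : A.length ≠ 0 := by
    intro hc
    exact h (by rw [List.eq_nil_of_length_eq_zero hc]; rfl)
  have hs : PySem.List.slice (PySem.List.sorted A (fun x => x) false)
      (some ((((PySem.List.sorted A (fun x => x) false).length / 2 : Nat) : Int) + 1)) none
      = (PySem.List.sorted A (fun x => x) false).drop ((PySem.List.sorted A (fun x => x) false).length / 2 + 1) := by
    exact_mod_cast PySem.List.slice_from_natCast (PySem.List.sorted A (fun x => x) false)
      ((PySem.List.sorted A (fun x => x) false).length / 2 + 1)
  rw [hs, List.length_drop, hl]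
  omega

-- A.sort(); if A == []: return []; mid = len(A)//2; b = [A[mid]];
-- return b + balanced_list(A[:mid]) + balanced_list(A[mid+1:])
def balanced_list (A : List Int) : List Int :=
  let s := PySem.List.sorted A (fun x => x) false
  if s = [] then []
  else
    let mid : Nat := s.length / 2            -- len(A) // 2 : floor division of a nonnegative length
    ((PySem.List.pyGet? s (mid : Int)).getD 0)   -- A[mid]; mid is always in range, getD makes it total
      :: []
      ++ balanced_list (PySem.List.slice s none (some (mid : Int)))
      ++ balanced_list (PySem.List.slice s (some ((mid : Int) + 1)) none)
termination_by A.length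
decreasing_by
  · exact balanced_list_dec_left A ‹¬ s = []›
  · exact balanced_list_dec_right A ‹¬ s = []›

-- ===== PORT B =====
-- inner helper go(lo, hi) of Source B: preorder walk over index ranges of the sorted list
def bstGo (s : List Int) (lo hi : Nat) : List Int :=
  if lo < hi then
    let mid : Nat := (lo + hi) / 2
    ((PySem.List.pyGet? s (mid : Int)).getD 0)    -- A[mid]; in range, getD makes it total
      :: [] ++ bstGo s lo mid ++ bstGo s (mid + 1) hi
  else []
termination_by hi - lo
decreasing_by all_goals omega

def balanced_list_alt (A : List Int) : List Int :=
  let s := PySem.List.sorted A (fun x => x) false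
  bstGo s 0 s.length

-- ===== PRECONDITION & SPEC =====
def Spec_balanced_list (A : List Int) (out : List Int) : Prop := out = balanced_list_alt A
instance (A : List Int) (out : List Int) : Decidable (Spec_balanced_list A out) := by unfold Spec_balanced_list; infer_instance

-- ===== CLAIM (what is proved, stated in full; the proofs are below) =====
def Claim_equal_balanced_list : Prop := ∀ (A : List Int), Dom_balanced_list A → Spec_balanced_list A (balanced_list A)

-- ===== LEMMAS AND PROOFS =====

-- on a sorted list s, go lo hi of B equals A run on the slice s[lo:hi]
lemma bstGo_eq_balanced_list (s : List Int) (hsort : s.Pairwise (· ≤ ·)) :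
    ∀ n lo hi : Nat, hi - lo = n → hi ≤ s.length →
      bstGo s lo hi = balanced_list ((s.drop lo).take (hi - lo)) := by
  intro n
  induction n using Nat.strong_induction_on with
  | _ n ih =>
    intro lo hi hn hhi
    rw [bstGo]
    by_cases h : lo < hi
    · simp only [if_pos h]
      set t : List Int := (s.drop lo).take (hi - lo) with ht
      have htlen : t.length = hi - lo := by
        rw [ht]; simp [List.length_take]; omega
      have htsorted : t.Pairwise (· ≤ ·) :=
        hsort.sublist ((List.take_sublist _ _).trans (List.drop_sublist _ _))
      have hts : PySem.List.sorted t (fun x => x) false = t :=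
        PySem.List.sorted_eq_self_of_pairwise t (fun x => x) htsorted
      have htne : ¬ t = [] := by
        intro hc; rw [hc] at htlen; simp at htlen; omega
      rw [balanced_list]
      simp only [hts, if_neg htne, htlen]
      have e1 : (PySem.List.pyGet? s (((lo + hi) / 2 : Nat) : Int)).getD 0
          = (PySem.List.pyGet? t (((hi - lo) / 2 : Nat) : Int)).getD 0 := by
        rw [PySem.List.pyGet?_natCast, PySem.List.pyGet?_natCast, ht,
          List.getElem?_take_of_lt (by omega), List.getElem?_drop]
        have : (lo + hi) / 2 = lo + (hi - lo) / 2 := by omega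
        rw [this]
      have e2 : bstGo s lo ((lo + hi) / 2)
          = balanced_list (PySem.List.slice t none (some (((hi - lo) / 2 : Nat) : Int))) := by
        rw [PySem.List.slice_to_natCast, ht, List.take_take]
        have h1 : min ((hi - lo) / 2) (hi - lo) = (hi - lo) / 2 := by omega
        rw [h1]
        have h2 := ih ((hi - lo) / 2) (by omega) lo (lo + (hi - lo) / 2) (by omega) (by omega)
        have h3 : lo + (hi - lo) / 2 - lo = (hi - lo) / 2 := by omega
        rw [h3] at h2
        have h4 : (lo + hi) / 2 = lo + (hi - lo) / 2 := by omega
        rw [h4, h2]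
      have e3 : bstGo s ((lo + hi) / 2 + 1) hi
          = balanced_list (PySem.List.slice t (some ((((hi - lo) / 2 : Nat) : Int) + 1)) none) := by
        have hs : PySem.List.slice t (some ((((hi - lo) / 2 : Nat) : Int) + 1)) none
            = t.drop ((hi - lo) / 2 + 1) := by
          have := PySem.List.slice_from_natCast t ((hi - lo) / 2 + 1)
          rw [← this]
          norm_num
        rw [hs, ht, List.drop_take, List.drop_drop]
        have h2 := ih (hi - (lo + (hi - lo) / 2 + 1)) (by omega) (lo + (hi - lo) / 2 + 1) hi (by omega) (by omega)
        have h4 : (lo + hi) / 2 + 1 = lo + (hi - lo) / 2 + 1 := by omega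
        rw [h4, h2]
        congr 2; omega
      rw [e1, e2, e3]
    · simp only [if_neg h]
      have h0 : hi - lo = 0 := by omega
      rw [h0, List.take_zero, balanced_list]
      simp [PySem.List.sorted_eq_nil_iff]

theorem balanced_list_eq_of_sorted (A : List Int) :
    balanced_list A = balanced_list (PySem.List.sorted A (fun x => x) false) := by
  conv_lhs => rw [balanced_list]
  conv_rhs => rw [balanced_list]
  simp only [PySem.List.sorted_sorted]

-- ===== VERDICT (by name: the statement is the Claim_ definition above) =====
theorem balanced_list_spec : Claim_equal_balanced_list := by
  intro A _
  show balanced_list A = balanced_list_alt A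
  unfold balanced_list_alt
  rw [bstGo_eq_balanced_list _ (PySem.List.sorted_pairwise A (fun x => x)) _ 0 _ rfl le_rfl]
  simp only [List.drop_zero, Nat.sub_zero, List.take_length]
  exact balanced_list_eq_of_sorted A
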